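-- pv_equiv track=rewrite | github.com/RushabhShah20/leetcode-solutions | easy/Longest Unequal Adjacent Groups Subsequence I/Python/main.py | getLongestSubsequence
-- ===== SOURCE A (Python) =====
-- from typing import List
--
-- def getLongestSubsequence(words: List[str], groups: List[int]) -> List[str]:
--     n: int = len(groups)
--     ans: List[str] = []
--     ans.append(words[0])
--     for i in range(1, n):
--         if groups[i] != groups[i - 1]:
--             ans.append(words[i])
--     return ans
-- ===== SOURCE B (Python) =====
-- from typing import List
--
-- def getLongestSubsequence(words: List[str], groups: List[int]) -> List[str]:
--     # Stage 1: label every position with its run id (prefix count of transitions).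
--     labels: List[int] = [0]
--     for i in range(1, len(groups)):
--         labels.append(labels[-1] + (groups[i] != groups[i - 1]))
--     # Stage 2: first position of each run id, via a dict keyed by run id.
--     first = {}
--     for i, lab in enumerate(labels):
--         if lab not in first:
--             first[lab] = i
--     # Stage 3: project the run-start positions onto words.
--     return [words[i] for i in first.values()]
-- ===== Notes on version B (the rewrite author's own statement) =====
-- stated objective: alternative
-- what changed: Replaces A's single adjacent-comparison filter loop by three staged passes: label each position with a run id (prefix count of group transitions), record the first position of each run id in a dict, then project those positions onto words.
import Mathlib
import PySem

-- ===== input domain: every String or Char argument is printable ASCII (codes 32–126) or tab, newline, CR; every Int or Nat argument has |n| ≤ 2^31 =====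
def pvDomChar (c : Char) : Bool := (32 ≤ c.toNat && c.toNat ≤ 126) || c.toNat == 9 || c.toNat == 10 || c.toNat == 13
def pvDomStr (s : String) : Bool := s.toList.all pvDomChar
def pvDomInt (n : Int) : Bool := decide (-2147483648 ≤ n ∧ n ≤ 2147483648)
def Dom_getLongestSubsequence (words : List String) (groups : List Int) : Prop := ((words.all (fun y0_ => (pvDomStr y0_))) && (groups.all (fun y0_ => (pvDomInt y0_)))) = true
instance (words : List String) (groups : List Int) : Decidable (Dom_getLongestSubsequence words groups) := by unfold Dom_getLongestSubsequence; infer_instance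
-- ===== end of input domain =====

-- B replaces A's adjacent-comparison filter by three staged passes: run-id labels by a prefix
-- count of transitions, a dict of first position per run id, then projection onto words
-- (alternative decomposition, same cost).

-- ===== PORT A =====
def getLongestSubsequence (words : List String) (groups : List Int) : List String :=
  let n : Int := (groups.length : Int)
  let ans : List String := [] ++ [(PySem.List.pyGet? words 0).getD ""]   -- words[0]; out of range excluded by Pre_
  (PySem.List.pyRange 1 n 1).foldl (fun ans i =>
    if (PySem.List.pyGet? groups i).getD 0 ≠ (PySem.List.pyGet? groups (i - 1)).getD 0 then
      ans ++ [(PySem.List.pyGet? words i).getD ""]                       -- words[i]; in range under Pre_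
    else ans) ans

-- ===== PORT B =====
def getLongestSubsequence_alt (words : List String) (groups : List Int) : List String :=
  -- Stage 1: labels[i] = run id of position i (labels[-1] + (groups[i] != groups[i-1]))
  let labels : List Int := (PySem.List.pyRange 1 (groups.length : Int) 1).foldl
    (fun labels i => labels ++ [(PySem.List.pyGet? labels (-1)).getD 0 +
      (if (PySem.List.pyGet? groups i).getD 0 ≠ (PySem.List.pyGet? groups (i - 1)).getD 0 then 1 else 0)])
    [0]
  -- Stage 2: first position of each run id
  let first : PySem.Dict Int Int := (PySem.List.enumerate labels).foldl
    (fun d p => if d.contains p.2 then d else d.insert p.2 p.1) PySem.Dict.empty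
  -- Stage 3: project onto words (words[i]; in range under Pre_)
  first.values.map (fun i => (PySem.List.pyGet? words i).getD "")

-- ===== PRECONDITION & SPEC =====
-- Pre_ excludes exactly the inputs on which A raises IndexError: empty words (words[0]),
-- or a group transition at an index ≥ len(words). B raises IndexError on the same inputs.
def Pre_getLongestSubsequence (words : List String) (groups : List Int) : Prop :=
  words ≠ [] ∧
    ∀ i : Nat, i < groups.length → 1 ≤ i →
      groups.getD i 0 ≠ groups.getD (i - 1) 0 → i < words.length
instance (words : List String) (groups : List Int) : Decidable (Pre_getLongestSubsequence words groups) := by unfold Pre_getLongestSubsequence; infer_instance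
def pvWitness_getLongestSubsequence : List String × List Int := (["a", "b", "c"], [1, 1, 2])

def Spec_getLongestSubsequence (words : List String) (groups : List Int) (out : List String) : Prop := out = getLongestSubsequence_alt words groups
instance (words : List String) (groups : List Int) (out : List String) : Decidable (Spec_getLongestSubsequence words groups out) := by unfold Spec_getLongestSubsequence; infer_instance

-- ===== CLAIM (what is proved, stated in full; the proofs are below) =====
def Claim_equal_getLongestSubsequence : Prop := ∀ (words : List String) (groups : List Int), Dom_getLongestSubsequence words groups → Pre_getLongestSubsequence words groups → Spec_getLongestSubsequence words groups (getLongestSubsequence words groups)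

-- ===== LEMMAS AND PROOFS =====

-- The transition indices of groups in [k, n), in order.
def pvTransIdx (groups : List Int) (n k : Int) : List Int :=
  if h : k < n then
    if (PySem.List.pyGet? groups k).getD 0 ≠ (PySem.List.pyGet? groups (k - 1)).getD 0 then
      k :: pvTransIdx groups n (k + 1)
    else pvTransIdx groups n (k + 1)
  else []
termination_by (n - k).toNat
decreasing_by all_goals omega

-- The run labels of positions [k, n), continuing from label L at position k-1.
def pvLabs (groups : List Int) (n L k : Int) : List Int :=
  if h : k < n then
    (if (PySem.List.pyGet? groups k).getD 0 ≠ (PySem.List.pyGet? groups (k - 1)).getD 0 then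
      (L + 1) :: pvLabs groups n (L + 1) (k + 1)
    else L :: pvLabs groups n L (k + 1))
  else []
termination_by (n - k).toNat
decreasing_by all_goals omega

-- A's loop appends the words at the transition indices.
theorem foldlA_eq_trans (words : List String) (groups : List Int) (n : Int) :
    ∀ a acc, (PySem.List.pyRange a n 1).foldl (fun ans i =>
      if (PySem.List.pyGet? groups i).getD 0 ≠ (PySem.List.pyGet? groups (i - 1)).getD 0 then
        ans ++ [(PySem.List.pyGet? words i).getD ""]
      else ans) acc
      = acc ++ (pvTransIdx groups n a).map (fun i => (PySem.List.pyGet? words i).getD "") := by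
  intro a
  induction a using pvTransIdx.induct (groups := groups) (n := n) with
  | case1 k hk hne ih =>
    intro acc
    rw [PySem.List.pyRange_one_cons hk, List.foldl_cons, if_pos hne, ih]
    conv_rhs => rw [pvTransIdx]
    rw [dif_pos hk, if_pos hne]
    simp
  | case2 k hk hne ih =>
    intro acc
    rw [PySem.List.pyRange_one_cons hk, List.foldl_cons, if_neg hne, ih]
    conv_rhs => rw [pvTransIdx]
    rw [dif_pos hk, if_neg hne]
  | case3 k hk =>
    intro acc
    conv_rhs => rw [pvTransIdx]
    rw [dif_neg hk]
    have : PySem.List.pyRange k n 1 = [] := by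
      simp [PySem.List.pyRange_one]
      omega
    simp [this]

-- B's label loop builds acc ++ pvLabs L, where L is acc's last element.
theorem foldlB_labels (groups : List Int) (n : Int) :
    ∀ L k acc, acc.getLast? = some L →
      (PySem.List.pyRange k n 1).foldl (fun labels i => labels ++
        [(PySem.List.pyGet? labels (-1)).getD 0 +
          (if (PySem.List.pyGet? groups i).getD 0 ≠ (PySem.List.pyGet? groups (i - 1)).getD 0 then 1 else 0)]) acc
      = acc ++ pvLabs groups n L k := by
  intro L k
  induction L, k using pvLabs.induct (groups := groups) (n := n) with
  | case1 L k hk hne ih =>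
    intro acc hlast
    rw [PySem.List.pyRange_one_cons hk, List.foldl_cons, if_pos hne,
      PySem.List.pyGet?_neg_one, hlast]
    have h1 : (Option.some L).getD 0 + 1 = L + 1 := by simp
    rw [h1, ih (acc ++ [L + 1]) (by simp)]
    conv_rhs => rw [pvLabs]
    rw [dif_pos hk, if_pos hne]
    simp
  | case2 L k hk hne ih =>
    intro acc hlast
    rw [PySem.List.pyRange_one_cons hk, List.foldl_cons, if_neg hne,
      PySem.List.pyGet?_neg_one, hlast]
    have h0 : (Option.some L).getD 0 + 0 = L := by simp
    rw [h0, ih (acc ++ [L]) (by simp)]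
    conv_rhs => rw [pvLabs]
    rw [dif_pos hk, if_neg hne]
    simp
  | case3 L k hk =>
    intro acc hlast
    conv_rhs => rw [pvLabs]
    rw [dif_neg hk]
    have : PySem.List.pyRange k n 1 = [] := by
      simp [PySem.List.pyRange_one]
      omega
    simp [this]

-- Folding the first-occurrence dict over the enumerated labels appends the transition indices
-- to the values, provided the current label L is a key of d and no larger label is.
theorem foldlB_dict (groups : List Int) (n : Int) :
    ∀ L k (d : PySem.Dict Int Int), d.contains L = true →
      (∀ K : Int, L < K → d.contains K = false) →
      ((PySem.List.enumerate (pvLabs groups n L k) k).foldl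
        (fun d p => if d.contains p.2 then d else d.insert p.2 p.1) d).values
      = d.values ++ pvTransIdx groups n k := by
  intro L k
  induction L, k using pvLabs.induct (groups := groups) (n := n) with
  | case1 L k hk hne ih =>
    intro d hL hgt
    conv_lhs => rw [pvLabs, dif_pos hk, if_pos hne, PySem.List.enumerate_cons, List.foldl_cons]
    have hc : d.contains (L + 1) = false := hgt (L + 1) (by omega)
    rw [if_neg (by simp [hc])]
    rw [ih (d.insert (L + 1) k) (PySem.Dict.contains_insert_self d (L + 1) k)
      (fun K hK => by
        rw [PySem.Dict.contains_insert]
        have h1 : (K == L + 1) = false := by simp; omega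
        rw [h1, hgt K (by omega)]; rfl)]
    have hv : (d.insert (L + 1) k).values = d.values ++ [k] := by
      simp only [PySem.Dict.values, PySem.Dict.items_insert_of_not_contains d k hc]
      simp
    rw [hv]
    conv_rhs => rw [pvTransIdx, dif_pos hk, if_pos hne]
    simp
  | case2 L k hk hne ih =>
    intro d hL hgt
    conv_lhs => rw [pvLabs, dif_pos hk, if_neg hne, PySem.List.enumerate_cons, List.foldl_cons]
    rw [if_pos hL, ih d hL hgt]
    conv_rhs => rw [pvTransIdx, dif_pos hk, if_neg hne]
  | case3 L k hk =>
    intro d hL hgt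
    conv_lhs => rw [pvLabs, dif_neg hk]
    conv_rhs => rw [pvTransIdx, dif_neg hk]
    simp [PySem.List.enumerate]

-- ===== VERDICT (by name: the statement is the Claim_ definition above) =====
theorem getLongestSubsequence_spec : Claim_equal_getLongestSubsequence := by
  intro words groups _ _
  unfold Spec_getLongestSubsequence
  simp only [getLongestSubsequence, getLongestSubsequence_alt]
  rw [foldlA_eq_trans, foldlB_labels groups (groups.length : Int) 0 1 [0] (by simp)]
  have hcons : ([0] : List Int) ++ pvLabs groups (groups.length : Int) 0 1
      = 0 :: pvLabs groups (groups.length : Int) 0 1 := by simp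
  rw [hcons, PySem.List.enumerate_cons, List.foldl_cons]
  rw [if_neg (by simp [PySem.Dict.contains_empty])]
  have h01 : (0 : Int) + 1 = 1 := by norm_num
  rw [h01, foldlB_dict groups (groups.length : Int) 0 1 (PySem.Dict.empty.insert 0 0)
    (PySem.Dict.contains_insert_self _ _ _)
    (fun K hK => by
      rw [PySem.Dict.contains_insert]
      have h1 : (K == (0 : Int)) = false := by simp; omega
      rw [h1, PySem.Dict.contains_empty]; rfl)]
  have hv : ((PySem.Dict.empty : PySem.Dict Int Int).insert 0 0).values = [0] := by decide
  rw [hv]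
  simp
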